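-- pv_equiv track=rewrite | github.com/HarjjotSinghh/leetcode | 2024/November/08_11_2024.py | getMaximumXor
-- ===== SOURCE A (Python) =====
-- from typing import List
--
-- def getMaximumXor(nums: List[int], maximumBit: int) -> List[int]:
--     prefix_xor = [0] * len(nums)
--     prefix_xor[0] = nums[0]
--     for i in range(1, len(nums)):
--         prefix_xor[i] = prefix_xor[i - 1] ^ nums[i]
--     ans = [0] * len(nums)
--     mask = (1 << maximumBit) - 1
--     for i in range(len(nums)):
--         current_xor = prefix_xor[len(prefix_xor) - 1 - i]
--         ans[i] = current_xor ^ mask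
--     return ans
-- ===== SOURCE B (Python) =====
-- from typing import List
--
-- def getMaximumXor(nums: List[int], maximumBit: int) -> List[int]:
--     total = nums[0]
--     for x in nums[1:]:
--         total ^= x
--     mask = (1 << maximumBit) - 1
--     ans = []
--     running = total
--     for x in reversed(nums):
--         ans.append(running ^ mask)
--         running ^= x
--     return ans
-- ===== Notes on version B (the rewrite author's own statement) =====
-- stated objective: simpler
-- what changed: B replaces A's materialised prefix-XOR array and second index-arithmetic fill loop by a single backward sweep over the list that maintains one scalar running XOR accumulator and appends to the answer.
import Mathlib
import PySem

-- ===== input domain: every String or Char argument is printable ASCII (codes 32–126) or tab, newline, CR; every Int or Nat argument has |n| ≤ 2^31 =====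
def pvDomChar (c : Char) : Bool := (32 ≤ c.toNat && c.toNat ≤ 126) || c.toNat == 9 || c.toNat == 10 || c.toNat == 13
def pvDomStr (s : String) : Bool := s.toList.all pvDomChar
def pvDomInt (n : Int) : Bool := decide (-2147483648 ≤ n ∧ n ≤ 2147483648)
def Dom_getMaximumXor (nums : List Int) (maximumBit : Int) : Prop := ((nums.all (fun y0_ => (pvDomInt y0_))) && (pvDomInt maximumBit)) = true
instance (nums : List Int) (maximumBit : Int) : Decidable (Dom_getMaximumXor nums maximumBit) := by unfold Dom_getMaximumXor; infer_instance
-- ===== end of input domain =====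

-- B drops A's prefix-XOR array: one backward sweep with a scalar running XOR ('simpler', same O(n) time).

-- ===== PORT A =====
-- Literal port of A.  `1 << maximumBit` is ported as `2 ^ maximumBit.toNat`, exact for
-- 0 ≤ maximumBit (Python raises ValueError for a negative shift; excluded by Pre_).
-- All list indices read/written are nonnegative and in range under Pre_ (nums ≠ []).
def getMaximumXor (nums : List Int) (maximumBit : Int) : List Int :=
  let n : Nat := nums.length
  -- prefix_xor = [0] * len(nums); prefix_xor[0] = nums[0]
  let prefixXor0 : List Int := (List.replicate n 0).set 0 (PySem.List.pyGetD nums 0 0)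
  -- for i in range(1, len(nums)): prefix_xor[i] = prefix_xor[i-1] ^ nums[i]
  let prefixXor : List Int := (PySem.List.pyRange 1 (n : Int) 1).foldl
    (fun px i =>
      px.set i.toNat (PySem.Int.bxor (PySem.List.pyGetD px (i - 1) 0) (PySem.List.pyGetD nums i 0)))
    prefixXor0
  -- ans = [0] * len(nums); mask = (1 << maximumBit) - 1
  let mask : Int := 2 ^ maximumBit.toNat - 1
  -- for i in range(len(nums)): ans[i] = prefix_xor[len(prefix_xor) - 1 - i] ^ mask
  (PySem.List.pyRange 0 (n : Int) 1).foldl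
    (fun ans i =>
      let currentXor := PySem.List.pyGetD prefixXor ((prefixXor.length : Int) - 1 - i) 0
      ans.set i.toNat (PySem.Int.bxor currentXor mask))
    (List.replicate n 0)

-- ===== PORT B =====
-- Literal port of Source B: total = XOR of all elements seeded from nums[0],
-- then one loop over reversed(nums) appending running ^ mask and updating running.
def getMaximumXor_alt (nums : List Int) (maximumBit : Int) : List Int :=
  let total : Int := (PySem.List.slice nums (some 1) none).foldl
    (fun t x => PySem.Int.bxor t x) (PySem.List.pyGetD nums 0 0)
  let mask : Int := 2 ^ maximumBit.toNat - 1
  (nums.reverse.foldl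
    (fun (st : Int × List Int) x => (PySem.Int.bxor st.1 x, st.2 ++ [PySem.Int.bxor st.1 mask]))
    (total, ([] : List Int))).2

-- ===== PRECONDITION & SPEC =====
-- Pre_ excludes exactly the inputs where A raises: nums = [] (IndexError on prefix_xor[0] = nums[0])
-- and maximumBit < 0 (ValueError on 1 << maximumBit).
def Pre_getMaximumXor (nums : List Int) (maximumBit : Int) : Prop :=
  nums ≠ [] ∧ 0 ≤ maximumBit
instance (nums : List Int) (maximumBit : Int) : Decidable (Pre_getMaximumXor nums maximumBit) := by
  unfold Pre_getMaximumXor; infer_instance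
def pvWitness_getMaximumXor : List Int × Int := ([3, 1, 2], 2)
def Spec_getMaximumXor (nums : List Int) (maximumBit : Int) (out : List Int) : Prop := out = getMaximumXor_alt nums maximumBit
instance (nums : List Int) (maximumBit : Int) (out : List Int) : Decidable (Spec_getMaximumXor nums maximumBit out) := by unfold Spec_getMaximumXor; infer_instance

-- ===== CLAIM (what is proved, stated in full; the proofs are below) =====
def Claim_equal_getMaximumXor : Prop := ∀ (nums : List Int) (maximumBit : Int), Dom_getMaximumXor nums maximumBit → Pre_getMaximumXor nums maximumBit → Spec_getMaximumXor nums maximumBit (getMaximumXor nums maximumBit)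

-- ===== LEMMAS AND PROOFS =====

-- ---- algebra of PySem.Int.bxor (assoc / left unit / self, not in the prelude) ----
theorem bxor_negSucc_left (m : Nat) (b : Int) :
    PySem.Int.bxor (Int.negSucc m) b = -(PySem.Int.bxor (m : Int) b) - 1 := by
  unfold PySem.Int.bxor
  rcases b with k|k <;> simp [Int.negSucc_eq] <;> omega

theorem bxor_negSucc_right (a : Int) (k : Nat) :
    PySem.Int.bxor a (Int.negSucc k) = -(PySem.Int.bxor a (k : Int)) - 1 := by
  unfold PySem.Int.bxor
  rcases a with m|m <;> simp [Int.negSucc_eq] <;> omega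

theorem bxor_c_left (m : Nat) (b : Int) :
    PySem.Int.bxor (-(m : Int) - 1) b = -(PySem.Int.bxor (m : Int) b) - 1 := by
  rw [show -(m : Int) - 1 = Int.negSucc m by rw [Int.negSucc_eq]; ring, bxor_negSucc_left]

theorem bxor_c_right (a : Int) (k : Nat) :
    PySem.Int.bxor a (-(k : Int) - 1) = -(PySem.Int.bxor a (k : Int)) - 1 := by
  rw [show -(k : Int) - 1 = Int.negSucc k by rw [Int.negSucc_eq]; ring, bxor_negSucc_right]

theorem bxor_assoc (a b c : Int) :
    PySem.Int.bxor (PySem.Int.bxor a b) c = PySem.Int.bxor a (PySem.Int.bxor b c) := by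
  rcases a with m|m <;> rcases b with k|k <;> rcases c with j|j <;>
    simp [bxor_negSucc_left, bxor_negSucc_right, bxor_c_left, bxor_c_right,
      PySem.Int.bxor_natCast, Nat.xor_assoc]

theorem bxor_zero_left (a : Int) : PySem.Int.bxor 0 a = a := by
  rw [PySem.Int.bxor_comm]; exact PySem.Int.bxor_zero a

-- xa l = XOR of all elements of l
def xa (l : List Int) : Int := l.foldl PySem.Int.bxor 0

theorem foldl_bxor_acc (l : List Int) (a : Int) :
    l.foldl PySem.Int.bxor a = PySem.Int.bxor a (xa l) := by
  induction l generalizing a with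
  | nil => simp [xa, PySem.Int.bxor_zero]
  | cons x l ih =>
    simp only [xa, List.foldl_cons]
    rw [ih, ih (PySem.Int.bxor 0 x), bxor_zero_left, bxor_assoc]

theorem xa_append (l₁ l₂ : List Int) : xa (l₁ ++ l₂) = PySem.Int.bxor (xa l₁) (xa l₂) := by
  rw [xa, List.foldl_append, foldl_bxor_acc]; rfl

theorem xa_cons (x : Int) (l : List Int) : xa (x :: l) = PySem.Int.bxor x (xa l) := by
  rw [xa, List.foldl_cons, foldl_bxor_acc, bxor_zero_left]

theorem xa_reverse (l : List Int) : xa l.reverse = xa l := by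
  induction l with
  | nil => rfl
  | cons x l ih =>
    rw [List.reverse_cons, xa_append, ih, xa_cons, show xa ([] : List Int) = 0 from rfl,
      PySem.Int.bxor_zero, xa_cons, PySem.Int.bxor_comm]

-- pf nums j = prefix_xor[j]
def pf (nums : List Int) (j : Nat) : Int := xa (nums.take (j + 1))

-- ---- A's first loop fills prefix_xor with pf ----
theorem prefix_fill (nums : List Int) (i : Nat) (h1 : 1 ≤ i) (h2 : i ≤ nums.length) :
    (PySem.List.pyRange (i : Int) (nums.length : Int) 1).foldl
      (fun px j =>
        px.set j.toNat (PySem.Int.bxor (PySem.List.pyGetD px (j - 1) 0) (PySem.List.pyGetD nums j 0)))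
      ((List.range i).map (pf nums) ++ List.replicate (nums.length - i) 0)
    = (List.range nums.length).map (pf nums) := by
  obtain ⟨k, hk⟩ : ∃ k, nums.length - i = k := ⟨_, rfl⟩
  induction k generalizing i with
  | zero =>
    have hi : i = nums.length := by omega
    subst hi
    rw [PySem.List.pyRange_one]
    simp
  | succ k ih =>
    have hi : i < nums.length := by omega
    rw [PySem.List.pyRange_one_cons (by exact_mod_cast hi), List.foldl_cons]
    have hstep : ((List.range i).map (pf nums) ++ List.replicate (nums.length - i) 0).set
        (Int.toNat i)
        (PySem.Int.bxor
          (PySem.List.pyGetD ((List.range i).map (pf nums) ++ List.replicate (nums.length - i) 0) ((i : Int) - 1) 0)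
          (PySem.List.pyGetD nums (i : Int) 0))
        = (List.range (i + 1)).map (pf nums) ++ List.replicate (nums.length - (i + 1)) 0 := by
      have hread : PySem.List.pyGetD ((List.range i).map (pf nums) ++ List.replicate (nums.length - i) 0) ((i : Int) - 1) 0
          = pf nums (i - 1) := by
        rw [show (i : Int) - 1 = ((i - 1 : Nat) : Int) by omega, PySem.List.pyGetD_natCast]
        have hlt : i - 1 < ((List.range i).map (pf nums)).length := by simp; omega
        rw [List.getD_eq_getElem _ _ (by simp [List.length_append]; omega),
          List.getElem_append_left hlt]
        simp [List.getElem_range]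
      have hnums : PySem.List.pyGetD nums (i : Int) 0 = nums[i] := by
        rw [PySem.List.pyGetD_natCast, List.getD_eq_getElem _ _ hi]
      have hpf : PySem.Int.bxor (pf nums (i - 1)) nums[i] = pf nums i := by
        have h1 : i - 1 + 1 = i := by omega
        rw [pf, pf, h1, List.take_add_one]
        have : nums[i]?.toList = [nums[i]] := by simp [List.getElem?_eq_getElem hi]
        rw [this, xa_append, xa_cons, show xa ([] : List Int) = 0 from rfl, PySem.Int.bxor_zero]
      rw [hread, hnums, hpf, Int.toNat_natCast, List.set_append]
      simp only [List.length_map, List.length_range, lt_irrefl, if_false, Nat.sub_self]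
      rw [show nums.length - i = (nums.length - (i+1)) + 1 by omega, List.replicate_succ,
        List.set_cons_zero, List.range_succ, List.map_append]
      simp
    rw [show (i : Int) + 1 = ((i + 1 : Nat) : Int) by omega] at *
    rw [hstep]
    exact ih (i + 1) (by omega) (by omega) (by omega)

-- ---- A's second loop fills ans ----
theorem ans_fill (g : Nat → Int) (n i : Nat) (h : i ≤ n)
    (f : List Int → Int → Int) (hf : ∀ (a : List Int) (j : Nat), j < n → f a (j : Int) = g j) :
    (PySem.List.pyRange (i : Int) (n : Int) 1).foldl
      (fun ans j => ans.set j.toNat (f ans j))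
      ((List.range i).map g ++ List.replicate (n - i) 0)
    = (List.range n).map g := by
  obtain ⟨k, hk⟩ : ∃ k, n - i = k := ⟨_, rfl⟩
  induction k generalizing i with
  | zero =>
    have hi : i = n := by omega
    subst hi
    rw [PySem.List.pyRange_one]
    simp
  | succ k ih =>
    have hi : i < n := by omega
    rw [PySem.List.pyRange_one_cons (by exact_mod_cast hi), List.foldl_cons,
      hf _ i hi, Int.toNat_natCast, List.set_append]
    simp only [List.length_map, List.length_range, lt_irrefl, if_false, Nat.sub_self]
    rw [show n - i = (n - (i+1)) + 1 by omega, List.replicate_succ, List.set_cons_zero,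
      show (i : Int) + 1 = ((i + 1 : Nat) : Int) by omega]
    have : (List.range i).map g ++ g i :: List.replicate (n - (i + 1)) 0
        = (List.range (i+1)).map g ++ List.replicate (n - (i + 1)) 0 := by
      rw [List.range_succ, List.map_append]; simp
    rw [this]
    exact ih (i + 1) (by omega) (by omega)

-- ---- B's loop emits ----
def emit (mask : Int) (r : Int) : List Int → List Int
  | [] => []
  | x :: l => PySem.Int.bxor r mask :: emit mask (PySem.Int.bxor r x) l

theorem foldB (mask : Int) (l : List Int) (r : Int) (acc : List Int) :
    (l.foldl (fun (st : Int × List Int) x =>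
        (PySem.Int.bxor st.1 x, st.2 ++ [PySem.Int.bxor st.1 mask])) (r, acc)).2
    = acc ++ emit mask r l := by
  induction l generalizing r acc with
  | nil => simp [emit]
  | cons x l ih => simp [emit, ih, List.append_assoc]

theorem emit_eq_map (mask : Int) (l : List Int) (r : Int) :
    emit mask r l = (List.range l.length).map
      (fun k => PySem.Int.bxor (PySem.Int.bxor r (xa (l.take k))) mask) := by
  induction l generalizing r with
  | nil => rfl
  | cons x l ih =>
    rw [emit, ih, List.length_cons, List.range_succ_eq_map, List.map_cons, List.map_map]
    refine congrArg₂ _ (by simp [xa, PySem.Int.bxor_zero]) (List.map_congr_left ?_)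
    intro k _
    simp only [Function.comp_apply, List.take_succ_cons, xa_cons, bxor_assoc]

-- ---- each port in closed form ----
theorem portA_eq (nums : List Int) (maximumBit : Int) (h : nums ≠ []) :
    getMaximumXor nums maximumBit
      = (List.range nums.length).map
          (fun k => PySem.Int.bxor (pf nums (nums.length - 1 - k)) (2 ^ maximumBit.toNat - 1)) := by
  obtain ⟨y, t, rfl⟩ : ∃ y t, nums = y :: t := by
    cases nums with | nil => exact absurd rfl h | cons y t => exact ⟨y, t, rfl⟩
  simp only [getMaximumXor]
  set nums := y :: t with hnums
  have hlen : 1 ≤ nums.length := by simp [hnums]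
  -- the initial prefix list
  have h0 : (List.replicate nums.length 0).set 0 (PySem.List.pyGetD nums 0 0)
      = (List.range 1).map (pf nums) ++ List.replicate (nums.length - 1) 0 := by
    rw [show (0 : Int) = ((0 : Nat) : Int) from rfl, PySem.List.pyGetD_natCast,
      show nums.length = (nums.length - 1) + 1 by omega, List.replicate_succ, List.set_cons_zero]
    simp [pf, xa, hnums, bxor_zero_left]
  have hpf := prefix_fill nums 1 le_rfl hlen
  simp only [Nat.cast_one] at hpf
  rw [h0, hpf]
  have hans := ans_fill
    (fun k => PySem.Int.bxor (pf nums (nums.length - 1 - k)) (2 ^ maximumBit.toNat - 1))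
    nums.length 0 (Nat.zero_le _)
    (fun a i => PySem.Int.bxor
      (PySem.List.pyGetD ((List.range nums.length).map (pf nums))
        (((((List.range nums.length).map (pf nums)).length : Nat) : Int) - 1 - i) 0)
      (2 ^ maximumBit.toNat - 1))
    (by
      intro a j hj
      have hread : PySem.List.pyGetD ((List.range nums.length).map (pf nums))
          (((((List.range nums.length).map (pf nums)).length : Nat) : Int) - 1 - (j : Int)) 0
          = pf nums (nums.length - 1 - j) := by
        rw [show (((((List.range nums.length).map (pf nums)).length : Nat) : Int) - 1 - (j : Int))
            = ((nums.length - 1 - j : Nat) : Int) by simp; omega, PySem.List.pyGetD_natCast,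
          List.getD_eq_getElem _ _ (by simp; omega)]
        simp [List.getElem_range]
      simp only [hread])
  simp only [Nat.cast_zero, List.range_zero, List.map_nil, List.nil_append, Nat.sub_zero] at hans
  exact hans
theorem portB_eq (nums : List Int) (maximumBit : Int) (h : nums ≠ []) :
    getMaximumXor_alt nums maximumBit
      = (List.range nums.length).map
          (fun k => PySem.Int.bxor (pf nums (nums.length - 1 - k)) (2 ^ maximumBit.toNat - 1)) := by
  obtain ⟨y, t, rfl⟩ : ∃ y t, nums = y :: t := by
    cases nums with | nil => exact absurd rfl h | cons y t => exact ⟨y, t, rfl⟩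
  simp only [getMaximumXor_alt]
  set nums := y :: t with hnums
  have htot : (PySem.List.slice nums (some 1) none).foldl
      (fun t x => PySem.Int.bxor t x) (PySem.List.pyGetD nums 0 0) = xa nums := by
    rw [PySem.List.slice_from_one, show (0 : Int) = ((0 : Nat) : Int) from rfl,
      PySem.List.pyGetD_natCast, hnums]
    show t.foldl PySem.Int.bxor y = _
    rw [foldl_bxor_acc, ← xa_cons]
  rw [htot, foldB, List.nil_append, emit_eq_map, List.length_reverse]
  apply List.map_congr_left
  intro k hk
  rw [List.mem_range] at hk
  rw [List.take_reverse, xa_reverse]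
  have hsplit : xa nums
      = PySem.Int.bxor (xa (nums.take (nums.length - k))) (xa (nums.drop (nums.length - k))) := by
    rw [← xa_append, List.take_append_drop]
  rw [hsplit, bxor_assoc (xa (nums.take (nums.length - k))) (xa (nums.drop (nums.length - k)))
      (xa (nums.drop (nums.length - k))), PySem.Int.bxor_self, PySem.Int.bxor_zero, pf,
    show nums.length - 1 - k + 1 = nums.length - k by omega]

-- ===== VERDICT (by name: the statement is the Claim_ definition above) =====
theorem getMaximumXor_spec : Claim_equal_getMaximumXor := by
  intro nums maximumBit _ hpre
  unfold Spec_getMaximumXor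
  rw [portA_eq nums maximumBit hpre.1, portB_eq nums maximumBit hpre.1]
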